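-- pv_equiv track=rewrite | github.com/markiengo/marqbot | backend/semester_recommender.py | _order_buckets_allocator_style
-- ===== SOURCE A (Python) =====
-- def _order_buckets_allocator_style(
--     bucket_ids: list[str],
--     bucket_meta: dict[str, dict],
-- ) -> list[str]:
--     unique = [str(b).strip() for b in bucket_ids if str(b).strip()]
--     unique = list(dict.fromkeys(unique))
--     unique.sort(key=lambda b: (bucket_meta.get(b, {}).get("priority", 99), b))
--     if len(unique) <= 1:
--         return unique
--
--     parent_order: list[str] = []
--     grouped: dict[str, dict[str, list[str]]] = {}
--     for bid in unique:
--         meta = bucket_meta.get(bid, {})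
--         parent = str(meta.get("parent_bucket_id", "") or "").strip()
--         if parent not in grouped:
--             grouped[parent] = {
--                 "required": [],
--                 "choose_n": [],
--                 "credits_pool": [],
--                 "other": [],
--             }
--             parent_order.append(parent)
--         mode = str(meta.get("requirement_mode", "") or "").strip().lower()
--         if mode == "required":
--             grouped[parent]["required"].append(bid)
--         elif mode == "choose_n":
--             grouped[parent]["choose_n"].append(bid)
--         elif mode == "credits_pool":
--             grouped[parent]["credits_pool"].append(bid)
--         else:
--             grouped[parent]["other"].append(bid)
--
--     def _sort_group(bucket_ids_: list[str]) -> list[str]: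
--         return sorted(
--             bucket_ids_,
--             key=lambda b: (bucket_meta.get(b, {}).get("priority", 99), b),
--         )
--
--     ordered: list[str] = []
--     for parent in parent_order:
--         ordered.extend(_sort_group(grouped[parent]["required"]))
--         ordered.extend(_sort_group(grouped[parent]["choose_n"]))
--         ordered.extend(_sort_group(grouped[parent]["credits_pool"]))
--         ordered.extend(_sort_group(grouped[parent]["other"]))
--     return ordered
-- ===== SOURCE B (Python) =====
-- def _order_buckets_allocator_style(
--     bucket_ids: list[str],
--     bucket_meta: dict[str, dict],
-- ) -> list[str]:
--     unique = [str(b).strip() for b in bucket_ids if str(b).strip()]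
--     unique = list(dict.fromkeys(unique))
--     unique.sort(key=lambda b: (bucket_meta.get(b, {}).get("priority", 99), b))
--     if len(unique) <= 1:
--         return unique
--
--     def parent(b: str) -> str:
--         return str(bucket_meta.get(b, {}).get("parent_bucket_id", "") or "").strip()
--
--     def mode_rank(b: str) -> int:
--         mode = str(bucket_meta.get(b, {}).get("requirement_mode", "") or "").strip().lower()
--         return {"required": 0, "choose_n": 1, "credits_pool": 2}.get(mode, 3)
--
--     parents = list(dict.fromkeys(parent(b) for b in unique))
--     return [
--         b
--         for p in parents
--         for r in range(4)
--         for b in unique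
--         if parent(b) == p and mode_rank(b) == r
--     ]
-- ===== Notes on version B (the rewrite author's own statement) =====
-- stated objective: simpler
-- what changed: B drops A's nested grouping dict and the four per-parent re-sorts: after the single priority sort it emits, for each first-appearance parent and each mode rank 0..3, the order-preserving filter of the sorted unique list, which is already in the right order.
import Mathlib
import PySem

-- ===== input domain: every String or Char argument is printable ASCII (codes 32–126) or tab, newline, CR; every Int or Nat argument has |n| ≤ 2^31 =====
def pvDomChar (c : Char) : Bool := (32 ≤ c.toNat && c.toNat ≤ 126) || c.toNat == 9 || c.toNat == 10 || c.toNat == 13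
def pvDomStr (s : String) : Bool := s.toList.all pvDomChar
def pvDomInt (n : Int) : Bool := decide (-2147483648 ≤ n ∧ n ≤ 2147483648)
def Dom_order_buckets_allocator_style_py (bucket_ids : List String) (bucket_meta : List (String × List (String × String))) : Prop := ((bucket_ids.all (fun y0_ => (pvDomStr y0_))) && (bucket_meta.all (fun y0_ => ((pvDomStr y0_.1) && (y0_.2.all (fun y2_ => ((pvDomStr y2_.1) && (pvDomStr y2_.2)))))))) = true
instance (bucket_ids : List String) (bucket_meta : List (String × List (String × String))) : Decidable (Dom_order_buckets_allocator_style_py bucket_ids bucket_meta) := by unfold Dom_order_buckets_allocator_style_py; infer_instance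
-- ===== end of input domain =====

-- B replaces A's grouped-dict-plus-four-per-parent-re-sorts by order-preserving filters of the
-- already-sorted unique list (objective: simpler; same asymptotic cost).

-- ===== PORT A =====
-- Helpers shared by both ports: transliterations of the lines the two Pythons share verbatim
-- (the dict argument, the strip/dedup/sort of bucket_ids, and the per-bucket meta accessors).
-- Python's bucket_meta is dict[str, dict[str, str]] under the type convention: duplicate keys
-- in the association list overwrite in place, exactly PySem.Dict.ofList.
def pvMeta (bucket_meta : List (String × List (String × String))) : PySem.Dict String (PySem.Dict String String) :=
  PySem.Dict.ofList (bucket_meta.map (fun p => (p.1, PySem.Dict.ofList p.2)))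

-- Python sort key (bucket_meta.get(b, {}).get("priority", 99), b). The default 99 is an int and a
-- str-vs-int comparison raises TypeError, so inside Pre_ (all unique buckets carry a priority, or
-- none does) the default is only ever compared with itself: any constant default gives Python's
-- exact order there; we use "".
def pvKey1 (M : PySem.Dict String (PySem.Dict String String)) (b : String) : String :=
  (M.getD b PySem.Dict.empty).getD "priority" ""

-- parent = str(meta.get("parent_bucket_id", "") or "").strip(); values are str, so 'or ""' and
-- str() are the identity (x or "" is x unless x == "", which maps to "").
def pvParent (M : PySem.Dict String (PySem.Dict String String)) (b : String) : String :=
  PySem.Str.strip ((M.getD b PySem.Dict.empty).getD "parent_bucket_id" "")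

-- mode = str(meta.get("requirement_mode", "") or "").strip().lower(); same remark on 'or ""'/str().
def pvMode (M : PySem.Dict String (PySem.Dict String String)) (b : String) : String :=
  PySem.Str.lower (PySem.Str.strip ((M.getD b PySem.Dict.empty).getD "requirement_mode" ""))

-- unique = [str(b).strip() for b in bucket_ids if str(b).strip()]; unique = list(dict.fromkeys(unique));
-- unique.sort(key=lambda b: (priority, b))  — identical lines in both Pythons.
def pvUnique (bucket_ids : List String) (bucket_meta : List (String × List (String × String))) : List String :=
  PySem.List.sorted2
    (PySem.List.dedup ((bucket_ids.map PySem.Str.strip).filter (fun s => !(s == ""))))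
    (pvKey1 (pvMeta bucket_meta)) (fun b => b)

-- A-only helpers: the grouped dict, its mode slot, and _sort_group.
def pvSlot (M : PySem.Dict String (PySem.Dict String String)) (b : String) : String :=
  if pvMode M b == "required" then "required"
  else if pvMode M b == "choose_n" then "choose_n"
  else if pvMode M b == "credits_pool" then "credits_pool"
  else "other"

def pvInitGroup : PySem.Dict String (List String) :=
  PySem.Dict.ofList [("required", []), ("choose_n", []), ("credits_pool", []), ("other", [])]

def pvStepA (M : PySem.Dict String (PySem.Dict String String))
    (st : List String × PySem.Dict String (PySem.Dict String (List String))) (bid : String) :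
    List String × PySem.Dict String (PySem.Dict String (List String)) :=
  let parent := pvParent M bid
  let st1 := if st.2.contains parent then st
             else (st.1 ++ [parent], st.2.insert parent pvInitGroup)
  (st1.1, st1.2.modify parent PySem.Dict.empty (fun g => g.modify (pvSlot M bid) [] (fun l => l ++ [bid])))

def pvSortGroup (M : PySem.Dict String (PySem.Dict String String)) (l : List String) : List String :=
  PySem.List.sorted2 l (pvKey1 M) (fun b => b)

def order_buckets_allocator_style_py (bucket_ids : List String) (bucket_meta : List (String × List (String × String))) : List String :=
  let M := pvMeta bucket_meta
  let unique := pvUnique bucket_ids bucket_meta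
  if unique.length ≤ 1 then unique
  else
    let st := unique.foldl (pvStepA M) ([], PySem.Dict.empty)
    st.1.foldl (fun acc parent =>
      let g := st.2.getD parent PySem.Dict.empty
      acc ++ pvSortGroup M (g.getD "required" []) ++ pvSortGroup M (g.getD "choose_n" [])
          ++ pvSortGroup M (g.getD "credits_pool" []) ++ pvSortGroup M (g.getD "other" [])) []

-- ===== PORT B =====
-- mode_rank(b) = {"required": 0, "choose_n": 1, "credits_pool": 2}.get(mode, 3)
def pvModeRank (M : PySem.Dict String (PySem.Dict String String)) (b : String) : Int :=
  (PySem.Dict.ofList [("required", (0 : Int)), ("choose_n", 1), ("credits_pool", 2)]).getD (pvMode M b) 3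

def order_buckets_allocator_style_py_alt (bucket_ids : List String) (bucket_meta : List (String × List (String × String))) : List String :=
  let M := pvMeta bucket_meta
  let unique := pvUnique bucket_ids bucket_meta
  if unique.length ≤ 1 then unique
  else
    let parents := PySem.List.dedup (unique.map (pvParent M))
    parents.flatMap (fun p =>
      (PySem.List.pyRange 0 4 1).flatMap (fun r =>
        unique.filter (fun b => pvParent M b == p && pvModeRank M b == r)))

-- ===== PRECONDITION & SPEC =====
-- Pre_ admits exactly the inputs on which Python A returns: when at least two distinct non-empty
-- stripped ids are sorted, the key (meta.get("priority", 99), b) mixes int 99 with str priorities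
-- unless every unique bucket has a "priority" entry or none has; on a mixed list Python's sort
-- always compares an int with a str and raises TypeError.
def Pre_order_buckets_allocator_style_py (bucket_ids : List String) (bucket_meta : List (String × List (String × String))) : Prop :=
  let us := PySem.List.dedup ((bucket_ids.map PySem.Str.strip).filter (fun s => !(s == "")))
  let hasPrio := fun b => ((PySem.Dict.ofList (bucket_meta.map (fun p => (p.1, PySem.Dict.ofList p.2)))).getD b PySem.Dict.empty).contains "priority"
  us.length ≤ 1 ∨ (∀ b ∈ us, hasPrio b = true) ∨ (∀ b ∈ us, hasPrio b = false)
instance (bucket_ids : List String) (bucket_meta : List (String × List (String × String))) : Decidable (Pre_order_buckets_allocator_style_py bucket_ids bucket_meta) := by unfold Pre_order_buckets_allocator_style_py; infer_instance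

def pvWitness_order_buckets_allocator_style_py : List String × (List (String × List (String × String))) :=
  (["b", "a"], [("a", [("requirement_mode", "required")])])

def Spec_order_buckets_allocator_style_py (bucket_ids : List String) (bucket_meta : List (String × List (String × String))) (out : List String) : Prop := out = order_buckets_allocator_style_py_alt bucket_ids bucket_meta
instance (bucket_ids : List String) (bucket_meta : List (String × List (String × String))) (out : List String) : Decidable (Spec_order_buckets_allocator_style_py bucket_ids bucket_meta out) := by unfold Spec_order_buckets_allocator_style_py; infer_instance

-- ===== CLAIM (what is proved, stated in full; the proofs are below) =====
def Claim_equal_order_buckets_allocator_style_py : Prop := ∀ (bucket_ids : List String) (bucket_meta : List (String × List (String × String))), Dom_order_buckets_allocator_style_py bucket_ids bucket_meta → Pre_order_buckets_allocator_style_py bucket_ids bucket_meta → Spec_order_buckets_allocator_style_py bucket_ids bucket_meta (order_buckets_allocator_style_py bucket_ids bucket_meta)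

-- ===== LEMMAS AND PROOFS =====

-- Python's tuple sort key (k1 x, k2 x) over strings is the lexicographic order on pairs.
def pvKeyLex (M : PySem.Dict String (PySem.Dict String String)) (b : String) : Lex (String × String) :=
  toLex (pvKey1 M b, b)

lemma pv_sorted2_eq_sorted_toLex {α : Type} (xs : List α) (k1 k2 : α → String) :
    PySem.List.sorted2 xs k1 k2 = PySem.List.sorted xs (fun x => toLex (k1 x, k2 x)) := by
  have h : (fun a b : α => decide (k1 a < k1 b) || (!decide (k1 b < k1 a) && decide (k2 a < k2 b)))
      = (fun a b : α => decide (toLex (k1 a, k2 a) < toLex (k1 b, k2 b))) := by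
    funext a b
    rcases lt_trichotomy (k1 a) (k1 b) with h|h|h <;>
      simp [Prod.Lex.lt_iff, h, lt_asymm, ne_of_lt]
  show xs.foldl (fun acc x => PySem.List.insertBy (fun a b => decide (k1 a < k1 b) || (!decide (k1 b < k1 a) && decide (k2 a < k2 b))) x acc) []
     = xs.foldl (fun acc x => PySem.List.insertBy (fun a b => decide (toLex (k1 a, k2 a) < toLex (k1 b, k2 b))) x acc) []
  rw [h]

lemma pv_unique_pairwise_lt (bucket_ids : List String) (bucket_meta : List (String × List (String × String))) :
    (pvUnique bucket_ids bucket_meta).Pairwise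
      (fun a b => pvKeyLex (pvMeta bucket_meta) a < pvKeyLex (pvMeta bucket_meta) b) := by
  unfold pvUnique
  rw [pv_sorted2_eq_sorted_toLex]
  have hle := PySem.List.sorted_pairwise
    (PySem.List.dedup ((bucket_ids.map PySem.Str.strip).filter (fun s => !(s == ""))))
    (fun b => toLex (pvKey1 (pvMeta bucket_meta) b, b))
  have hnd : (PySem.List.sorted
      (PySem.List.dedup ((bucket_ids.map PySem.Str.strip).filter (fun s => !(s == ""))))
      (fun b => toLex (pvKey1 (pvMeta bucket_meta) b, b))).Nodup :=
    (PySem.List.sorted_perm _ _ false).symm.nodup (PySem.List.nodup_dedup _)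
  exact (hle.and hnd).imp (fun {a b} h12 =>
    lt_of_le_of_ne h12.1 (fun he => h12.2 (congrArg (fun x => (ofLex x).2) he)))

lemma pv_sortGroup_filter (M : PySem.Dict String (PySem.Dict String String)) (u : List String)
    (q : String → Bool) (hs : u.Pairwise (fun a b => pvKeyLex M a < pvKeyLex M b)) :
    pvSortGroup M (u.filter q) = u.filter q := by
  unfold pvSortGroup
  rw [pv_sorted2_eq_sorted_toLex]
  exact PySem.List.sorted_eq_of_perm_of_pairwise_lt _ _ (fun b => toLex (pvKey1 M b, b))
    (List.Perm.refl _) (hs.filter q)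

lemma pv_stepA_fst (M : PySem.Dict String (PySem.Dict String String)) (l : List String)
    (po : List String) (g : PySem.Dict String (PySem.Dict String (List String)))
    (hc : ∀ p, g.contains p = decide (p ∈ po)) :
    (l.foldl (pvStepA M) (po, g)).1 = PySem.Set.update po (l.map (pvParent M)) := by
  induction l generalizing po g with
  | nil => simp [PySem.Set.update]
  | cons b l ih =>
    simp only [List.foldl_cons, List.map_cons]
    have hp := hc (pvParent M b)
    rw [show PySem.Set.update po (pvParent M b :: l.map (pvParent M))
          = PySem.Set.update (PySem.Set.add po (pvParent M b)) (l.map (pvParent M)) from rfl]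
    by_cases h : g.contains (pvParent M b) = true
    · have hmem : pvParent M b ∈ po := by rw [hp] at h; exact of_decide_eq_true h
      have hstep : pvStepA M (po, g) b
          = (po, g.modify (pvParent M b) PySem.Dict.empty
              (fun gr => gr.modify (pvSlot M b) [] (fun l => l ++ [b]))) := by
        simp [pvStepA, h]
      have hadd : PySem.Set.add po (pvParent M b) = po := by
        simp [PySem.Set.add, hmem]
      rw [hstep, hadd]
      refine ih po _ ?_
      intro p
      rw [PySem.Dict.contains_modify]
      by_cases hpb : p = pvParent M b
      · simp [hpb, hp, hmem]
      · simp [hpb, hc p]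
    · have hmem : pvParent M b ∉ po := by
        rw [hp] at h; simpa using h
      have hstep : pvStepA M (po, g) b
          = (po ++ [pvParent M b], (g.insert (pvParent M b) pvInitGroup).modify (pvParent M b) PySem.Dict.empty
              (fun gr => gr.modify (pvSlot M b) [] (fun l => l ++ [b]))) := by
        simp [pvStepA, h]
      have hadd : PySem.Set.add po (pvParent M b) = po ++ [pvParent M b] := by
        simp [PySem.Set.add, hmem]
      rw [hstep, hadd]
      refine ih (po ++ [pvParent M b]) _ ?_
      intro p
      rw [PySem.Dict.contains_modify, PySem.Dict.contains_insert]
      by_cases hpb : p = pvParent M b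
      · simp [hpb]
      · simp [hpb, hc p]

lemma pv_initGroup_getD (s : String)
    (hs : s = "required" ∨ s = "choose_n" ∨ s = "credits_pool" ∨ s = "other") :
    pvInitGroup.getD s [] = [] := by
  rcases hs with rfl|rfl|rfl|rfl <;> decide

lemma pv_stepA_snd_getD (M : PySem.Dict String (PySem.Dict String String))
    (po : List String) (g : PySem.Dict String (PySem.Dict String (List String)))
    (b slot p : String)
    (hslot : slot = "required" ∨ slot = "choose_n" ∨ slot = "credits_pool" ∨ slot = "other") :
    (((pvStepA M (po, g) b).2.getD p PySem.Dict.empty).getD slot []) =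
      ((g.getD p PySem.Dict.empty).getD slot []) ++
        (if pvParent M b == p && pvSlot M b == slot then [b] else []) := by
  by_cases hcont : g.contains (pvParent M b) = true
  · simp only [pvStepA, hcont, if_true]
    rw [PySem.Dict.getD_modify]
    by_cases hpb : p = pvParent M b
    · rw [if_pos hpb, PySem.Dict.getD_modify, hpb]
      by_cases hss : slot = pvSlot M b
      · rw [if_pos hss, hss]
        simp
      · rw [if_neg hss]
        have hbe : (pvSlot M b == slot) = false :=
          beq_eq_false_iff_ne.mpr (fun hx => hss (Eq.symm hx))
        simp [hbe]
    · rw [if_neg hpb]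
      have hbe : (pvParent M b == p) = false :=
        beq_eq_false_iff_ne.mpr (fun hx => hpb (Eq.symm hx))
      simp [hbe]
  · simp only [pvStepA, hcont, Bool.false_eq_true, if_false]
    rw [PySem.Dict.getD_modify]
    by_cases hpb : p = pvParent M b
    · rw [if_pos hpb, PySem.Dict.getD_modify, hpb,
          PySem.Dict.getD_insert, if_pos rfl,
          PySem.Dict.getD_of_not_contains g PySem.Dict.empty (by simpa using hcont)]
      by_cases hss : slot = pvSlot M b
      · rw [if_pos hss, pv_initGroup_getD _ (hss ▸ hslot)]
        simp [hss]
      · rw [if_neg hss, pv_initGroup_getD _ hslot]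
        have hbe : (pvSlot M b == slot) = false :=
          beq_eq_false_iff_ne.mpr (fun hx => hss (Eq.symm hx))
        simp [hbe, PySem.Dict.getD_empty]
    · rw [if_neg hpb, PySem.Dict.getD_insert, if_neg hpb]
      have hbe : (pvParent M b == p) = false :=
        beq_eq_false_iff_ne.mpr (fun hx => hpb (Eq.symm hx))
      simp [hbe]

lemma pv_stepA_getD (M : PySem.Dict String (PySem.Dict String String)) (l : List String)
    (po : List String) (g : PySem.Dict String (PySem.Dict String (List String)))
    (slot : String)
    (hslot : slot = "required" ∨ slot = "choose_n" ∨ slot = "credits_pool" ∨ slot = "other") (p : String) :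
    (((l.foldl (pvStepA M) (po, g)).2.getD p PySem.Dict.empty).getD slot []) =
      ((g.getD p PySem.Dict.empty).getD slot []) ++
        l.filter (fun b => pvParent M b == p && pvSlot M b == slot) := by
  induction l generalizing po g with
  | nil => simp
  | cons b l ih =>
    rw [List.foldl_cons,
        show pvStepA M (po, g) b = ((pvStepA M (po, g) b).1, (pvStepA M (po, g) b).2) from rfl,
        ih ((pvStepA M (po, g) b).1) ((pvStepA M (po, g) b).2),
        pv_stepA_snd_getD M po g b slot p hslot, List.filter_cons]
    by_cases hcond : (pvParent M b == p && pvSlot M b == slot) = true <;>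
      simp [hcond, List.append_assoc]

lemma pv_rank_slot (M : PySem.Dict String (PySem.Dict String String)) (b : String) :
    (pvSlot M b = "required" ∧ pvModeRank M b = 0) ∨
    (pvSlot M b = "choose_n" ∧ pvModeRank M b = 1) ∨
    (pvSlot M b = "credits_pool" ∧ pvModeRank M b = 2) ∨
    (pvSlot M b = "other" ∧ pvModeRank M b = 3) := by
  have hof : PySem.Dict.ofList [("required", (0 : Int)), ("choose_n", 1), ("credits_pool", 2)]
      = ((PySem.Dict.empty.insert "required" (0 : Int)).insert "choose_n" 1).insert "credits_pool" 2 := rfl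
  unfold pvModeRank pvSlot
  by_cases h1 : pvMode M b = "required"
  · left; exact ⟨by simp [h1], by rw [h1]; decide⟩
  · by_cases h2 : pvMode M b = "choose_n"
    · right; left; exact ⟨by simp [h2], by rw [h2]; decide⟩
    · by_cases h3 : pvMode M b = "credits_pool"
      · right; right; left; exact ⟨by simp [h3], by rw [h3]; decide⟩
      · right; right; right
        refine ⟨by simp [h1, h2, h3], ?_⟩
        rw [hof, PySem.Dict.getD_insert, if_neg h3, PySem.Dict.getD_insert, if_neg h2,
            PySem.Dict.getD_insert, if_neg h1, PySem.Dict.getD_empty]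

lemma pv_slot_beq_rank (M : PySem.Dict String (PySem.Dict String String)) (b : String) :
    (pvSlot M b == "required") = (pvModeRank M b == (0 : Int)) ∧
    (pvSlot M b == "choose_n") = (pvModeRank M b == (1 : Int)) ∧
    (pvSlot M b == "credits_pool") = (pvModeRank M b == (2 : Int)) ∧
    (pvSlot M b == "other") = (pvModeRank M b == (3 : Int)) := by
  rcases pv_rank_slot M b with ⟨h1, h2⟩|⟨h1, h2⟩|⟨h1, h2⟩|⟨h1, h2⟩ <;> rw [h1, h2] <;>
    exact ⟨by decide, by decide, by decide, by decide⟩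

lemma pv_main (M : PySem.Dict String (PySem.Dict String String)) (u : List String)
    (hpw : u.Pairwise (fun a b => pvKeyLex M a < pvKeyLex M b)) :
    ((u.foldl (pvStepA M) ([], PySem.Dict.empty)).1.foldl (fun acc parent =>
        let g := (u.foldl (pvStepA M) ([], PySem.Dict.empty)).2.getD parent PySem.Dict.empty
        acc ++ pvSortGroup M (g.getD "required" []) ++ pvSortGroup M (g.getD "choose_n" [])
            ++ pvSortGroup M (g.getD "credits_pool" []) ++ pvSortGroup M (g.getD "other" [])) [])
      = (PySem.List.dedup (u.map (pvParent M))).flatMap (fun p =>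
          (PySem.List.pyRange 0 4 1).flatMap (fun r =>
            u.filter (fun b => pvParent M b == p && pvModeRank M b == r))) := by
  have hfst : (u.foldl (pvStepA M) ([], PySem.Dict.empty)).1 = PySem.List.dedup (u.map (pvParent M)) := by
    rw [pv_stepA_fst M u [] PySem.Dict.empty (by intro p; simp [PySem.Dict.contains_empty]),
        PySem.List.dedup_eq_ofList]
    rfl
  have hgrp : ∀ slot, (slot = "required" ∨ slot = "choose_n" ∨ slot = "credits_pool" ∨ slot = "other") → ∀ p : String,
      (((u.foldl (pvStepA M) ([], PySem.Dict.empty)).2.getD p PySem.Dict.empty).getD slot [])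
        = u.filter (fun b => pvParent M b == p && pvSlot M b == slot) := by
    intro slot hs p
    rw [pv_stepA_getD M u [] PySem.Dict.empty slot hs p]
    simp [PySem.Dict.getD_empty]
  have hGfun : (fun (acc : List String) parent =>
        let g := (u.foldl (pvStepA M) ([], PySem.Dict.empty)).2.getD parent PySem.Dict.empty
        acc ++ pvSortGroup M (g.getD "required" []) ++ pvSortGroup M (g.getD "choose_n" [])
            ++ pvSortGroup M (g.getD "credits_pool" []) ++ pvSortGroup M (g.getD "other" []))
      = (fun acc parent => acc ++ (fun p => (PySem.List.pyRange 0 4 1).flatMap (fun r =>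
            u.filter (fun b => pvParent M b == p && pvModeRank M b == r))) parent) := by
    funext acc p
    dsimp only
    rw [hgrp "required" (by simp) p, hgrp "choose_n" (by simp) p,
        hgrp "credits_pool" (by simp) p, hgrp "other" (by simp) p,
        pv_sortGroup_filter M u _ hpw, pv_sortGroup_filter M u _ hpw,
        pv_sortGroup_filter M u _ hpw, pv_sortGroup_filter M u _ hpw,
        List.filter_congr (fun b _ => by rw [(pv_slot_beq_rank M b).1] :
          ∀ b ∈ u, (pvParent M b == p && pvSlot M b == "required")
                 = (pvParent M b == p && pvModeRank M b == (0 : Int))),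
        List.filter_congr (fun b _ => by rw [(pv_slot_beq_rank M b).2.1] :
          ∀ b ∈ u, (pvParent M b == p && pvSlot M b == "choose_n")
                 = (pvParent M b == p && pvModeRank M b == (1 : Int))),
        List.filter_congr (fun b _ => by rw [(pv_slot_beq_rank M b).2.2.1] :
          ∀ b ∈ u, (pvParent M b == p && pvSlot M b == "credits_pool")
                 = (pvParent M b == p && pvModeRank M b == (2 : Int))),
        List.filter_congr (fun b _ => by rw [(pv_slot_beq_rank M b).2.2.2] :
          ∀ b ∈ u, (pvParent M b == p && pvSlot M b == "other")
                 = (pvParent M b == p && pvModeRank M b == (3 : Int))),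
        show PySem.List.pyRange 0 4 1 = [0, 1, 2, 3] from rfl]
    simp [List.append_assoc]
  rw [hGfun, PySem.List.foldl_append_eq_flatMap, hfst]
  rfl

-- ===== VERDICT (by name: the statement is the Claim_ definition above) =====
theorem order_buckets_allocator_style_py_spec : Claim_equal_order_buckets_allocator_style_py := by
  intro bucket_ids bucket_meta _ _
  unfold Spec_order_buckets_allocator_style_py order_buckets_allocator_style_py order_buckets_allocator_style_py_alt
  by_cases hlen : (pvUnique bucket_ids bucket_meta).length ≤ 1
  · simp only [if_pos hlen]
  · simp only [if_neg hlen]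
    exact pv_main (pvMeta bucket_meta) (pvUnique bucket_ids bucket_meta)
      (pv_unique_pairwise_lt bucket_ids bucket_meta)
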